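-- pv_equiv track=rewrite | github.com/jacobchristopher/CIS-667-Project | neural_network.py | clause_encoding
-- ===== SOURCE A (Python) =====
-- def clause_encoding(exp: str, literals: list) -> list:
--     encoded_clause = []
--     while exp != "":
--         # Empty Space
--         if exp[0:1] == ' ':
--             exp = exp[1:len(exp)]
--
--         # Operators
--         elif exp[0:1] == ")":
--             exp = exp[1:len(exp)]
--             encoded_clause.append([1,0,1,0,0,0,0,0])
--         elif exp[0:1] == "(":
--             exp = exp[1:len(exp)]
--             encoded_clause.append([1,1,0,0,0,0,0,0])
--         elif exp[0:1] == "-": # '->' Operator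
--             exp = exp[2:len(exp)]
--             encoded_clause.append([1,0,0,0,0,0,1,0])
--         elif exp[0:1] == "|":
--             exp = exp[1:len(exp)]
--             encoded_clause.append([1,0,0,0,0,1,0,0])
--         elif exp[0:1] == "&":
--             exp = exp[1:len(exp)]
--             encoded_clause.append([1,0,0,0,1,0,0,0])
--         elif exp[0:1] == "~":
--             exp = exp[1:len(exp)]
--             encoded_clause.append([1,0,0,1,0,0,0,0])
--
--         # Literals
--         elif exp[0:1] in literals: # Literal already encountered
--             idx = literals.index(exp[0:1])
--             lit = [0]*(idx+1) + [1] + [0]*(6-idx)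
--             encoded_clause.append(lit)
--             exp = exp[1:len(exp)]
--         else: # New literal
--             literals.append(exp[0:1]) # Add literal to list (encode next iteration)
--
--     # Add row padding
--     for i in range(8 - len(encoded_clause)): encoded_clause.append([0,0,0,0,0,0,0,0])
--     return encoded_clause, literals
-- ===== SOURCE B (Python) =====
-- OPS = {')': [1,0,1,0,0,0,0,0], '(': [1,1,0,0,0,0,0,0], '-': [1,0,0,0,0,0,1,0],
--        '|': [1,0,0,0,0,1,0,0], '&': [1,0,0,0,1,0,0,0], '~': [1,0,0,1,0,0,0,0]}
--
-- def clause_encoding(exp: str, literals: list) -> list: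
--     # pass 1: tokenize, registering new literals in first-appearance order
--     tokens = []
--     i = 0
--     while i < len(exp):
--         ch = exp[i]
--         if ch == ' ':
--             i += 1
--         elif ch in OPS:
--             tokens.append(ch)
--             i += 2 if ch == '-' else 1
--         else:
--             if ch not in literals:
--                 literals.append(ch)
--             tokens.append(ch)
--             i += 1
--     # pass 2: encode each token as its one-hot row
--     encoded = []
--     for ch in tokens:
--         if ch in OPS:
--             encoded.append(list(OPS[ch]))
--         else:
--             idx = literals.index(ch)
--             encoded.append([0]*(idx+1) + [1] + [0]*(6-idx))
--     encoded += [[0]*8 for _ in range(8 - len(encoded))]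
--     return encoded, literals
-- ===== Notes on version B (the rewrite author's own statement) =====
-- stated objective: alternative
-- what changed: A's single interleaved while-loop (which re-scans a new literal on the next iteration to encode it) is replaced by two separate passes: a tokenizer that registers new literals via an operator table, then a map from tokens to one-hot rows using the final literal list.
import Mathlib
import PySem

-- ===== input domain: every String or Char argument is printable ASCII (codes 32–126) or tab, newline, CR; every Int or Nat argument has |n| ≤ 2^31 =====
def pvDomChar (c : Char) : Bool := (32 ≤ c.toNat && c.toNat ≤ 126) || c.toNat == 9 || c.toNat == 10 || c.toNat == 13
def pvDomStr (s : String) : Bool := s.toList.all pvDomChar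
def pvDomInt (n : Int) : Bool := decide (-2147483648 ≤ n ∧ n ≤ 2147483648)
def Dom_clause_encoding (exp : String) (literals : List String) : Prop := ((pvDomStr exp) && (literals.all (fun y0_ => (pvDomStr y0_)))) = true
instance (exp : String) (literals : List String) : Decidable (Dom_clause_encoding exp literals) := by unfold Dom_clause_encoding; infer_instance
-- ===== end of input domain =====

-- B replaces A's single interleaved while-loop by two separate passes (tokenize via an operator
-- table, then map tokens to one-hot rows); same returned pair, objective 'alternative', no speed
-- claim. Both Pythons append new literals to the passed-in list in place identically; the
-- equivalence proved here is about the returned pair.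

-- ===== PORT A =====
-- one-hot row for a literal at index idx (A's `[0]*(idx+1) + [1] + [0]*(6-idx)`)
def pvRowA (idx : Nat) : List Int :=
  List.replicate (idx + 1) 0 ++ [1] ++ List.replicate (6 - idx) 0

-- the `while exp != ""` loop; state = (remaining chars, literals, encoded_clause)
def caLoop : List Char → List String → List (List Int) → List (List Int) × List String
  | [], lits, acc => (acc, lits)
  | c :: rest, lits, acc =>
    if c = ' ' then caLoop rest lits acc
    else if c = ')' then caLoop rest lits (acc ++ [[1,0,1,0,0,0,0,0]])
    else if c = '(' then caLoop rest lits (acc ++ [[1,1,0,0,0,0,0,0]])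
    else if c = '-' then caLoop (rest.drop 1) lits (acc ++ [[1,0,0,0,0,0,1,0]])
    else if c = '|' then caLoop rest lits (acc ++ [[1,0,0,0,0,1,0,0]])
    else if c = '&' then caLoop rest lits (acc ++ [[1,0,0,0,1,0,0,0]])
    else if c = '~' then caLoop rest lits (acc ++ [[1,0,0,1,0,0,0,0]])
    else if String.ofList [c] ∈ lits then
      caLoop rest lits (acc ++ [pvRowA ((PySem.List.index? lits (String.ofList [c])).getD 0)])
    else
      caLoop (c :: rest) (lits ++ [String.ofList [c]]) acc
  termination_by cs lits _ =>
    2 * cs.length + (match cs with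
      | [] => 0
      | c :: _ => if String.ofList [c] ∈ lits then 0 else 1)
  decreasing_by
  all_goals simp only [List.length_cons, List.length_drop]
  all_goals repeat' split
  all_goals simp_all
  all_goals omega

def clause_encoding (exp : String) (literals : List String) : List (List Int) × List String :=
  let r := caLoop exp.toList literals []
  -- `for i in range(8 - len(encoded_clause)): encoded_clause.append([0]*8)`
  ((PySem.List.pyRange 0 (8 - (r.1.length : Int)) 1).foldl
      (fun acc _ => acc ++ [[0,0,0,0,0,0,0,0]]) r.1,
   r.2)

-- ===== PORT B =====
-- operator table (B's OPS dict)
def pvOps : List (Char × List Int) :=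
  [(')', [1,0,1,0,0,0,0,0]), ('(', [1,1,0,0,0,0,0,0]), ('-', [1,0,0,0,0,0,1,0]),
   ('|', [1,0,0,0,0,1,0,0]), ('&', [1,0,0,0,1,0,0,0]), ('~', [1,0,0,1,0,0,0,0])]

def pvOpRow? (c : Char) : Option (List Int) := pvOps.lookup c

-- pass 1: token list + updated literals (new literals registered in first-appearance order)
def pvTokenize : List Char → List String → List Char × List String
  | [], lits => ([], lits)
  | c :: rest, lits =>
    if c = ' ' then pvTokenize rest lits
    else if (pvOpRow? c).isSome then
      let r := pvTokenize (if c = '-' then rest.drop 1 else rest) lits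
      (c :: r.1, r.2)
    else if String.ofList [c] ∈ lits then
      let r := pvTokenize rest lits
      (c :: r.1, r.2)
    else
      let r := pvTokenize rest (lits ++ [String.ofList [c]])
      (c :: r.1, r.2)
  termination_by cs _ => cs.length
  decreasing_by
  all_goals simp only [List.length_cons]
  all_goals repeat' split
  all_goals simp [List.length_tail]

-- pass 2: one token → one row
def pvEncodeTok (lits : List String) (c : Char) : List Int :=
  match pvOpRow? c with
  | some r => r
  | none => List.replicate (((PySem.List.index? lits (String.ofList [c])).getD 0) + 1) 0
              ++ [1] ++ List.replicate (6 - ((PySem.List.index? lits (String.ofList [c])).getD 0)) 0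

def clause_encoding_alt (exp : String) (literals : List String) : List (List Int) × List String :=
  let r := pvTokenize exp.toList literals
  let enc := r.1.map (pvEncodeTok r.2)
  (enc ++ List.replicate (8 - enc.length) (List.replicate 8 0), r.2)

-- ===== PRECONDITION & SPEC =====
def Spec_clause_encoding (exp : String) (literals : List String) (out : List (List Int) × List String) : Prop := out = clause_encoding_alt exp literals
instance (exp : String) (literals : List String) (out : List (List Int) × List String) : Decidable (Spec_clause_encoding exp literals out) := by unfold Spec_clause_encoding; infer_instance

-- ===== CLAIM (what is proved, stated in full; the proofs are below) =====
def Claim_equal_clause_encoding : Prop := ∀ (exp : String) (literals : List String), Dom_clause_encoding exp literals → Spec_clause_encoding exp literals (clause_encoding exp literals)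

-- ===== LEMMAS AND PROOFS =====

-- the tokenizer only ever appends to `literals`
theorem pvTokenize_snd_extends (cs : List Char) (lits : List String) :
    ∃ e, (pvTokenize cs lits).2 = lits ++ e := by
  induction cs, lits using pvTokenize.induct with
  | case1 lits => exact ⟨[], by simp [pvTokenize]⟩
  | case2 rest lits ih =>
      obtain ⟨e, he⟩ := ih
      exact ⟨e, by rw [pvTokenize]; simpa using he⟩
  | case3 c rest lits h1 h2 ih =>
      obtain ⟨e, he⟩ := ih
      exact ⟨e, by rw [pvTokenize]; simp only [if_neg h1, if_pos h2]; exact he⟩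
  | case4 c rest lits h1 h2 h3 ih =>
      obtain ⟨e, he⟩ := ih
      exact ⟨e, by rw [pvTokenize]; simp only [if_neg h1, if_neg h2, if_pos h3]; exact he⟩
  | case5 c rest lits h1 h2 h3 ih =>
      obtain ⟨e, he⟩ := ih
      exact ⟨[String.ofList [c]] ++ e, by
        rw [pvTokenize]; simp only [if_neg h1, if_neg h2, if_neg h3]
        rw [he, List.append_assoc]⟩

-- a character that is none of the six operators is absent from the operator table
theorem pvOpRow?_eq_none {c : Char} (h2 : ¬c = ')') (h3 : ¬c = '(') (h4 : ¬c = '-')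
    (h5 : ¬c = '|') (h6 : ¬c = '&') (h7 : ¬c = '~') : pvOpRow? c = none := by
  have e2 : (c == ')') = false := by simp [h2]
  have e3 : (c == '(') = false := by simp [h3]
  have e4 : (c == '-') = false := by simp [h4]
  have e5 : (c == '|') = false := by simp [h5]
  have e6 : (c == '&') = false := by simp [h6]
  have e7 : (c == '~') = false := by simp [h7]
  simp [pvOpRow?, pvOps, List.lookup, e2, e3, e4, e5, e6, e7]

-- the A-loop equals pass 1 followed by pass 2
theorem caLoop_eq (cs : List Char) (lits : List String) (acc : List (List Int)) :
    caLoop cs lits acc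
      = (acc ++ ((pvTokenize cs lits).1.map (pvEncodeTok (pvTokenize cs lits).2)),
         (pvTokenize cs lits).2) := by
  induction cs, lits, acc using caLoop.induct with
  | case1 lits acc => simp [caLoop, pvTokenize]
  | case2 rest lits acc ih =>
      rw [caLoop, pvTokenize]; simpa using ih
  | case3 rest lits acc h1 ih =>
      rw [caLoop, pvTokenize]; simp [pvEncodeTok, pvOpRow?, pvOps, List.lookup, ih]
  | case4 rest lits acc h1 h2 ih =>
      rw [caLoop, pvTokenize]; simp [pvEncodeTok, pvOpRow?, pvOps, List.lookup, ih]
  | case5 rest lits acc h1 h2 h3 ih =>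
      simp only [List.drop_one] at ih
      rw [caLoop, pvTokenize]; simp [pvEncodeTok, pvOpRow?, pvOps, List.lookup, ih]
  | case6 rest lits acc h1 h2 h3 h4 ih =>
      rw [caLoop, pvTokenize]; simp [pvEncodeTok, pvOpRow?, pvOps, List.lookup, ih]
  | case7 rest lits acc h1 h2 h3 h4 h5 ih =>
      rw [caLoop, pvTokenize]; simp [pvEncodeTok, pvOpRow?, pvOps, List.lookup, ih]
  | case8 rest lits acc h1 h2 h3 h4 h5 h6 ih =>
      rw [caLoop, pvTokenize]; simp [pvEncodeTok, pvOpRow?, pvOps, List.lookup, ih]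
  | case9 c rest lits acc h1 h2 h3 h4 h5 h6 h7 h8 ih =>
      have hop := pvOpRow?_eq_none h2 h3 h4 h5 h6 h7
      obtain ⟨e, he⟩ := pvTokenize_snd_extends rest lits
      rw [caLoop, pvTokenize]
      simp only [if_neg h1, if_neg h2, if_neg h3, if_neg h4, if_neg h5, if_neg h6, if_neg h7,
        if_pos h8, hop, Option.isSome_none, Bool.false_eq_true, if_false]
      rw [ih]
      simp only [List.map_cons, Prod.mk.injEq, and_true]
      rw [pvEncodeTok, hop]
      simp only [he, PySem.List.index?_append_of_mem e h8, pvRowA, List.append_assoc,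
        List.cons_append, List.nil_append]
  | case10 c rest lits acc h1 h2 h3 h4 h5 h6 h7 h8 ih =>
      have hop := pvOpRow?_eq_none h2 h3 h4 h5 h6 h7
      have hT : pvTokenize (c :: rest) (lits ++ [String.ofList [c]])
          = (c :: (pvTokenize rest (lits ++ [String.ofList [c]])).1,
             (pvTokenize rest (lits ++ [String.ofList [c]])).2) := by
        rw [pvTokenize]
        simp [h1, hop]
      rw [caLoop, pvTokenize]
      simp only [if_neg h1, if_neg h2, if_neg h3, if_neg h4, if_neg h5, if_neg h6, if_neg h7,
        if_neg h8, hop, Option.isSome_none, Bool.false_eq_true, if_false]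
      rw [ih, hT]

-- A's padding foldl is B's replicate append
theorem pad_eq (enc : List (List Int)) :
    (PySem.List.pyRange 0 (8 - (enc.length : Int)) 1).foldl
        (fun acc _ => acc ++ [[0,0,0,0,0,0,0,0]]) enc
      = enc ++ List.replicate (8 - enc.length) (List.replicate 8 0) := by
  rw [PySem.List.pyRange_one,
      PySem.List.foldl_append_singleton_eq_map (f := fun _ => ([0,0,0,0,0,0,0,0] : List Int))]
  have h : (8 - (enc.length : Int) - 0).toNat = 8 - enc.length := by omega
  simp only [List.map_map, h]
  rw [show (fun _ => ([0,0,0,0,0,0,0,0] : List Int)) ∘ (fun k : Nat => (0:Int) + k)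
        = fun _ => ([0,0,0,0,0,0,0,0] : List Int) from rfl,
      List.map_const', List.length_range]
  rfl

-- ===== VERDICT (by name: the statement is the Claim_ definition above) =====
theorem clause_encoding_spec : Claim_equal_clause_encoding := by
  intro exp literals _
  unfold Spec_clause_encoding clause_encoding clause_encoding_alt
  simp only [caLoop_eq, List.nil_append, pad_eq]
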